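-- pv_equiv track=rewrite | github.com/StrategicMilk/Vetinari-Orchestrastor | vetinari/adapters/grammar_library.py | _rfind_outside_strings
-- ===== SOURCE A (Python) =====
-- def _rfind_outside_strings(text: str, target: str) -> int:
--     """Return the index of the last occurrence of ``target`` that is outside a JSON string literal.
--
--     Uses an explicit state machine that tracks whether the current character is
--     inside a double-quoted JSON string (flipping ``in_string`` on unescaped
--     ``"``).  This prevents ``}`` or ``]`` characters that appear *inside* a
--     string value (e.g. ``{"key": "value with {braces}"}`` ) from being
--     mistaken as structural boundaries.
--
--     Args:
--         text: JSON text to scan (may be a truncated budget slice).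
--         target: Single character to find (``"}"`` or ``"]"``).
--
--     Returns:
--         Index of the last occurrence of ``target`` outside any string literal,
--         or ``-1`` if not found.
--     """
--     in_string = False  # True while inside a JSON double-quoted string
--     last_found = -1
--     i = 0
--     while i < len(text):
--         char = text[i]
--         if in_string:
--             if char == "\\":
--                 # Escape sequence — skip the next character unconditionally
--                 i += 2
--                 continue
--             if char == '"':
--                 in_string = False
--         else:
--             if char == '"':
--                 in_string = True
--             elif char == target:
--                 last_found = i
--         i += 1
--     return last_found
-- ===== SOURCE B (Python) =====
-- def _rfind_outside_strings(text: str, target: str) -> int: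
--     """Two-phase: first record the (start, end) spans of JSON string literals
--     (quotes included; an unterminated string extends to the end of the text),
--     then scan backwards for the first occurrence of ``target`` outside every
--     recorded span.  Returns -1 if there is none."""
--     n = len(text)
--     spans = []
--     i = 0
--     while i < n:
--         if text[i] == '"':
--             j = i + 1
--             while j < n:
--                 if text[j] == '\\':
--                     j += 2
--                 elif text[j] == '"':
--                     j += 1
--                     break
--                 else:
--                     j += 1
--             spans.append((i, j))
--             i = j
--         else:
--             i += 1
--     for k in range(n - 1, -1, -1):
--         if text[k] == target and not any(s <= k < e for s, e in spans):
--             return k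
--     return -1
-- ===== Notes on version B (the rewrite author's own statement) =====
-- stated objective: alternative
-- what changed: A interleaves string-state tracking and target matching in one forward pass; B first collects the (start,end) spans of JSON string literals in a forward pass and then scans backwards from the end, returning the first target occurrence outside every span.
import Mathlib
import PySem

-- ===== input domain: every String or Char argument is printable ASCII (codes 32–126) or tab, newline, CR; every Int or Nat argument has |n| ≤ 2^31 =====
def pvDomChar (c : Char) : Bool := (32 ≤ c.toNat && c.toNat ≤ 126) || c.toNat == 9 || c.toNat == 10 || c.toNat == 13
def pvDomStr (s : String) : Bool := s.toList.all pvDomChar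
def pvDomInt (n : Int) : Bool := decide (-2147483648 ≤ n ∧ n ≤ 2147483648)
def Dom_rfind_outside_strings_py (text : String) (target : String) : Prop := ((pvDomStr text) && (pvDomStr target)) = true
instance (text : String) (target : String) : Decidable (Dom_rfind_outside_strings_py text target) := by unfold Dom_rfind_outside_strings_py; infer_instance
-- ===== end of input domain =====

-- B replaces A's single interleaved state-machine pass by a two-phase decomposition
-- (collect string-literal spans forward, then scan for the target backwards); objective: alternative, same cost.

-- ===== PORT A =====
-- A's while-loop: i advances by 1 (or 2 on an escape), tracking in_string and last_found.
def pvA_loop (cs : List Char) (target : String) (inString : Bool) (lastFound : Int) (i : Nat) : Int :=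
  if h : i < cs.length then
    if inString then
      if cs[i] = '\\' then pvA_loop cs target true lastFound (i+2)
      else if cs[i] = '"' then pvA_loop cs target false lastFound (i+1)
      else pvA_loop cs target true lastFound (i+1)
    else
      if cs[i] = '"' then pvA_loop cs target true lastFound (i+1)
      else if String.ofList [cs[i]] = target then pvA_loop cs target false (Int.ofNat i) (i+1)
      else pvA_loop cs target false lastFound (i+1)
  else lastFound
termination_by cs.length - i
decreasing_by all_goals omega

def rfind_outside_strings_py (text : String) (target : String) : Int :=
  pvA_loop text.toList target false (-1) 0

-- ===== PORT B =====
-- B's inner while-loop: scan a string literal starting after its opening quote, return end (exclusive).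
def pvB_scan (cs : List Char) (j : Nat) : Nat :=
  if h : j < cs.length then
    if cs[j] = '\\' then pvB_scan cs (j+2)
    else if cs[j] = '"' then j+1
    else pvB_scan cs (j+1)
  else j
termination_by cs.length - j
decreasing_by all_goals omega

-- needed by pvB_spans's decreasing_by: the scanner never moves backwards
theorem pvB_scan_ge (cs : List Char) (j : Nat) : j ≤ pvB_scan cs j := by
  rw [pvB_scan]
  split_ifs with h1 h2 h3
  · have := pvB_scan_ge cs (j+2); omega
  · omega
  · have := pvB_scan_ge cs (j+1); omega
  · omega
termination_by cs.length - j
decreasing_by all_goals omega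

-- B's outer while-loop: collect the (start, end-exclusive) spans of string literals.
def pvB_spans (cs : List Char) (i : Nat) : List (Nat × Nat) :=
  if h : i < cs.length then
    if cs[i] = '"' then (i, pvB_scan cs (i+1)) :: pvB_spans cs (pvB_scan cs (i+1))
    else pvB_spans cs (i+1)
  else []
termination_by cs.length - i
decreasing_by
  · have := pvB_scan_ge cs (i+1); omega
  · omega

-- `any(s <= k < e for s, e in spans)`
def pvB_inSpan (spans : List (Nat × Nat)) (k : Nat) : Bool :=
  spans.any (fun p => decide (p.1 ≤ k) && decide (k < p.2))

-- B's backward for-loop over range(n-1, -1, -1); every index probed is < cs.length, so getD is exact.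
def pvB_back (cs : List Char) (target : String) (spans : List (Nat × Nat)) : Nat → Int
  | 0 => -1
  | k+1 =>
    if String.ofList [cs.getD k ' '] = target ∧ pvB_inSpan spans k = false then Int.ofNat k
    else pvB_back cs target spans k

def rfind_outside_strings_py_alt (text : String) (target : String) : Int :=
  pvB_back text.toList target (pvB_spans text.toList 0) text.toList.length

-- ===== PRECONDITION & SPEC =====
def Spec_rfind_outside_strings_py (text : String) (target : String) (out : Int) : Prop := out = rfind_outside_strings_py_alt text target
instance (text : String) (target : String) (out : Int) : Decidable (Spec_rfind_outside_strings_py text target out) := by unfold Spec_rfind_outside_strings_py; infer_instance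

-- ===== CLAIM (what is proved, stated in full; the proofs are below) =====
def Claim_equal_rfind_outside_strings_py : Prop := ∀ (text : String) (target : String), Dom_rfind_outside_strings_py text target → Spec_rfind_outside_strings_py text target (rfind_outside_strings_py text target)

-- ===== LEMMAS AND PROOFS =====

-- single-character match test at index k
def pvMch (cs : List Char) (target : String) (k : Nat) : Bool :=
  decide (String.ofList [cs.getD k ' '] = target)

-- indices A would test against target from position i onwards in state inStr
def pvCand (cs : List Char) (i : Nat) (inStr : Bool) : List Nat :=
  if h : i < cs.length then
    if inStr then
      if cs[i] = '\\' then pvCand cs (i+2) true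
      else if cs[i] = '"' then pvCand cs (i+1) false
      else pvCand cs (i+1) true
    else
      if cs[i] = '"' then pvCand cs (i+1) true
      else i :: pvCand cs (i+1) false
  else []
termination_by cs.length - i
decreasing_by all_goals omega

theorem pvCand_bounds (cs : List Char) (i : Nat) (s : Bool) :
    ∀ k ∈ pvCand cs i s, i ≤ k ∧ k < cs.length := by
  intro k hk
  rw [pvCand] at hk
  split_ifs at hk with h1 h2 h3 h4 h5
  · have := pvCand_bounds cs (i+2) true k hk; omega
  · have := pvCand_bounds cs (i+1) false k hk; omega
  · have := pvCand_bounds cs (i+1) true k hk; omega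
  · have := pvCand_bounds cs (i+1) true k hk; omega
  · simp only [List.mem_cons] at hk
    rcases hk with rfl | hk
    · omega
    · have := pvCand_bounds cs (i+1) false k hk; omega
  · simp at hk

termination_by cs.length - i
decreasing_by all_goals omega

theorem pvCand_pairwise (cs : List Char) (i : Nat) (s : Bool) :
    (pvCand cs i s).Pairwise (· < ·) := by
  rw [pvCand]
  split_ifs with h1 h2 h3 h4 h5
  · exact pvCand_pairwise cs (i+2) true
  · exact pvCand_pairwise cs (i+1) false
  · exact pvCand_pairwise cs (i+1) true
  · exact pvCand_pairwise cs (i+1) true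
  · refine List.pairwise_cons.mpr ⟨?_, pvCand_pairwise cs (i+1) false⟩
    intro k hk
    have := pvCand_bounds cs (i+1) false k hk; omega
  · exact List.Pairwise.nil
termination_by cs.length - i
decreasing_by all_goals omega

theorem pvA_char (cs : List Char) (t : String) (s : Bool) (last : Int) (i : Nat) :
    pvA_loop cs t s last i =
      (((pvCand cs i s).filter (pvMch cs t)).getLast?.map Int.ofNat).getD last := by
  rw [pvA_loop, pvCand]
  split_ifs with h1 h2 h3 h4 h5 h6
  · exact pvA_char cs t true last (i+2)
  · exact pvA_char cs t false last (i+1)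
  · exact pvA_char cs t true last (i+1)
  · exact pvA_char cs t true last (i+1)
  · -- match at i
    have hm : pvMch cs t i = true := by
      simp [pvMch, List.getD_eq_getElem?_getD, List.getElem?_eq_getElem h1, h6]
    rw [pvA_char cs t false (Int.ofNat i) (i+1)]
    rw [List.filter_cons_of_pos hm]
    cases hF : (pvCand cs (i+1) false).filter (pvMch cs t) with
    | nil => simp
    | cons a l =>
      rw [List.getLast?_cons_cons]
      obtain ⟨v, hv⟩ := Option.isSome_iff_exists.mp (List.getLast?_isSome.mpr (List.cons_ne_nil a l))
      rw [hv]; simp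
  · -- no match at i
    have hm : pvMch cs t i = false := by
      simp [pvMch, List.getD_eq_getElem?_getD, List.getElem?_eq_getElem h1, h6]
    rw [pvA_char cs t false last (i+1), List.filter_cons_of_neg (by simp [hm])]
  · simp
termination_by cs.length - i
decreasing_by all_goals omega

theorem pvCand_true_eq (cs : List Char) (j : Nat) :
    pvCand cs j true = pvCand cs (pvB_scan cs j) false := by
  by_cases h1 : j < cs.length
  · by_cases h2 : cs[j] = '\\'
    · have e1 : pvCand cs j true = pvCand cs (j+2) true := by rw [pvCand]; simp [h1, h2]
      have e2 : pvB_scan cs j = pvB_scan cs (j+2) := by rw [pvB_scan]; simp [h1, h2]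
      rw [e1, e2]; exact pvCand_true_eq cs (j+2)
    · by_cases h3 : cs[j] = '"'
      · have e1 : pvCand cs j true = pvCand cs (j+1) false := by rw [pvCand]; simp [h1, h3]
        have e2 : pvB_scan cs j = j+1 := by rw [pvB_scan]; simp [h1, h3]
        rw [e1, e2]
      · have e1 : pvCand cs j true = pvCand cs (j+1) true := by rw [pvCand]; simp [h1, h2, h3]
        have e2 : pvB_scan cs j = pvB_scan cs (j+1) := by rw [pvB_scan]; simp [h1, h2, h3]
        rw [e1, e2]; exact pvCand_true_eq cs (j+1)
  · have e1 : pvCand cs j true = [] := by rw [pvCand]; simp [h1]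
    have e2 : pvB_scan cs j = j := by rw [pvB_scan]; simp [h1]
    have e3 : pvCand cs j false = [] := by rw [pvCand]; simp [h1]
    rw [e1, e2, e3]
termination_by cs.length - j
decreasing_by all_goals omega

theorem pvB_spans_fst_ge (cs : List Char) (j : Nat) :
    ∀ p ∈ pvB_spans cs j, j ≤ p.1 := by
  intro p hp
  rw [pvB_spans] at hp
  split_ifs at hp with h1 h2
  · rcases List.mem_cons.mp hp with rfl | hp
    · simp
    · have h3 := pvB_spans_fst_ge cs (pvB_scan cs (j+1)) p hp
      have := pvB_scan_ge cs (j+1); omega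
  · have := pvB_spans_fst_ge cs (j+1) p hp; omega
  · simp at hp
termination_by cs.length - j
decreasing_by
  · have := pvB_scan_ge cs (j+1); omega
  · omega

theorem pvB_inSpan_false_iff (spans : List (Nat × Nat)) (k : Nat) :
    pvB_inSpan spans k = false ↔ ∀ p ∈ spans, ¬(p.1 ≤ k ∧ k < p.2) := by
  simp [pvB_inSpan, List.any_eq_false]

theorem pvCand_iff_span (cs : List Char) (i : Nat) :
    ∀ k, i ≤ k → k < cs.length →
      (k ∈ pvCand cs i false ↔ pvB_inSpan (pvB_spans cs i) k = false) := by
  intro k hik hk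
  by_cases h1 : i < cs.length
  · by_cases h2 : cs[i] = '"'
    · -- opening quote at i
      have e1 : pvCand cs i false = pvCand cs (pvB_scan cs (i+1)) false := by
        rw [pvCand]; simp [h1, h2, pvCand_true_eq cs (i+1)]
      have e2 : pvB_spans cs i = (i, pvB_scan cs (i+1)) :: pvB_spans cs (pvB_scan cs (i+1)) := by
        rw [pvB_spans]; simp [h1, h2]
      rw [e1, e2]
      have hsc := pvB_scan_ge cs (i+1)
      by_cases hke : k < pvB_scan cs (i+1)
      · constructor
        · intro hmem
          have := pvCand_bounds cs (pvB_scan cs (i+1)) false k hmem; omega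
        · intro hspan
          rw [pvB_inSpan_false_iff] at hspan
          exact absurd ⟨hik, hke⟩ (hspan (i, pvB_scan cs (i+1)) (by simp))
      · rw [pvCand_iff_span cs (pvB_scan cs (i+1)) k (by omega) hk]
        rw [pvB_inSpan_false_iff, pvB_inSpan_false_iff]
        constructor
        · intro hall p hp
          rcases List.mem_cons.mp hp with rfl | hp
          · simp; omega
          · exact hall p hp
        · intro hall p hp
          exact hall p (List.mem_cons_of_mem _ hp)
    · -- ordinary character at i
      have e1 : pvCand cs i false = i :: pvCand cs (i+1) false := by
        rw [pvCand]; simp [h1, h2]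
      have e2 : pvB_spans cs i = pvB_spans cs (i+1) := by
        rw [pvB_spans]; simp [h1, h2]
      rw [e1, e2, List.mem_cons]
      by_cases hki : k = i
      · subst hki
        constructor
        · intro _
          rw [pvB_inSpan_false_iff]
          intro p hp
          have := pvB_spans_fst_ge cs (k+1) p hp; omega
        · intro _; exact Or.inl rfl
      · rw [pvCand_iff_span cs (i+1) k (by omega) hk]
        constructor
        · intro h; rcases h with h | h
          · omega
          · exact h
        · intro h; exact Or.inr h
  · omega
termination_by cs.length - i
decreasing_by
  · have := pvB_scan_ge cs (i+1); omega
  · omega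

theorem pvB_char (cs : List Char) (t : String) (spans : List (Nat × Nat)) (m : Nat) :
    pvB_back cs t spans m =
      (((List.range m).filter (fun k => pvMch cs t k && !pvB_inSpan spans k)).getLast?.map Int.ofNat).getD (-1) := by
  induction m with
  | zero => simp [pvB_back]
  | succ k ih =>
    rw [pvB_back, List.range_succ, List.filter_append]
    by_cases hq : (pvMch cs t k && !pvB_inSpan spans k) = true
    · have hc : String.ofList [cs.getD k ' '] = t ∧ pvB_inSpan spans k = false := by
        simp [pvMch] at hq; exact hq
      rw [if_pos hc]
      have hfk : List.filter (fun k => pvMch cs t k && !pvB_inSpan spans k) [k] = [k] := by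
        simp [hq]
      rw [hfk, List.getLast?_concat]
      rfl
    · have hc : ¬(String.ofList [cs.getD k ' '] = t ∧ pvB_inSpan spans k = false) := by
        simp [pvMch] at hq ⊢; intro h; exact hq h
      rw [if_neg hc]
      have hfk : List.filter (fun k => pvMch cs t k && !pvB_inSpan spans k) [k] = [] := by
        simp only [List.filter_cons, List.filter_nil, if_neg hq]
      rw [hfk, List.append_nil]
      exact ih

theorem pvSortedEqOfMem (l₁ : List ℕ) :
    ∀ l₂ : List ℕ, l₁.Pairwise (· < ·) → l₂.Pairwise (· < ·) →
      (∀ a, a ∈ l₁ ↔ a ∈ l₂) → l₁ = l₂ := by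
  induction l₁ with
  | nil =>
    intro l₂ _ _ h
    cases l₂ with
    | nil => rfl
    | cons b m => exact absurd ((h b).mpr (by simp)) (by simp)
  | cons a l ih =>
    intro l₂ p₁ p₂ h
    cases l₂ with
    | nil => exact absurd ((h a).mp (by simp)) (by simp)
    | cons b m =>
      obtain ⟨ha₁, pl⟩ := List.pairwise_cons.mp p₁
      obtain ⟨hb₁, pm⟩ := List.pairwise_cons.mp p₂
      have hab : a = b := by
        rcases List.mem_cons.mp ((h a).mp (by simp)) with h1 | h1
        · exact h1
        · rcases List.mem_cons.mp ((h b).mpr (by simp)) with h2 | h2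
          · exact h2.symm
          · have := hb₁ a h1; have := ha₁ b h2; omega
      subst hab
      have hlm : ∀ x, x ∈ l ↔ x ∈ m := by
        intro x
        constructor
        · intro hx
          rcases List.mem_cons.mp ((h x).mp (List.mem_cons_of_mem _ hx)) with h1 | h1
          · have := ha₁ x hx; omega
          · exact h1
        · intro hx
          rcases List.mem_cons.mp ((h x).mpr (List.mem_cons_of_mem _ hx)) with h1 | h1
          · have := hb₁ x hx; omega
          · exact h1
      rw [ih m pl pm hlm]

theorem pv_filters_eq (cs : List Char) (t : String) :
    (pvCand cs 0 false).filter (pvMch cs t) =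
      (List.range cs.length).filter (fun k => pvMch cs t k && !pvB_inSpan (pvB_spans cs 0) k) := by
  have hmem : ∀ k, k ∈ (pvCand cs 0 false).filter (pvMch cs t) ↔
      k ∈ (List.range cs.length).filter (fun k => pvMch cs t k && !pvB_inSpan (pvB_spans cs 0) k) := by
    intro k
    rw [List.mem_filter, List.mem_filter, List.mem_range]
    constructor
    · intro ⟨hmem, hm⟩
      have hb := pvCand_bounds cs 0 false k hmem
      have hs := (pvCand_iff_span cs 0 k (Nat.zero_le k) hb.2).mp hmem
      simp [hm, hs, hb.2]
    · intro ⟨hk, hq⟩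
      simp only [Bool.and_eq_true, Bool.not_eq_true'] at hq
      exact ⟨(pvCand_iff_span cs 0 k (Nat.zero_le k) hk).mpr hq.2, hq.1⟩
  have s1 : (pvCand cs 0 false).filter (pvMch cs t) |>.Pairwise (· < ·) :=
    (pvCand_pairwise cs 0 false).filter _
  have s2 : ((List.range cs.length).filter (fun k => pvMch cs t k && !pvB_inSpan (pvB_spans cs 0) k)).Pairwise (· < ·) :=
    (List.pairwise_lt_range).filter _
  exact pvSortedEqOfMem _ _ s1 s2 hmem

-- ===== VERDICT (by name: the statement is the Claim_ definition above) =====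
theorem rfind_outside_strings_py_spec : Claim_equal_rfind_outside_strings_py := by
  intro text target _
  unfold Spec_rfind_outside_strings_py rfind_outside_strings_py rfind_outside_strings_py_alt
  rw [pvA_char, pvB_char, pv_filters_eq]
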